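-- pv_equiv track=rewrite | github.com/ajmdroid/v1g2_simple | scripts/check_perf_csv_column_contract.py | count_format_fields
-- ===== SOURCE A (Python) =====
-- def count_format_fields(fmt: str) -> int:
--     count = 0
--     idx = 0
--     while idx < len(fmt):
--         if fmt[idx] != "%":
--             idx += 1
--             continue
--         if idx + 1 < len(fmt) and fmt[idx + 1] == "%":
--             idx += 2
--             continue
--         count += 1
--         idx += 1
--     return count
-- ===== SOURCE B (Python) =====
-- from itertools import groupby
--
--
-- def count_format_fields(fmt: str) -> int:
--     count = 0
--     for key, grp in groupby(fmt):
--         if key == "%" and sum(1 for _ in grp) % 2 == 1: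
--             count += 1
--     return count
-- ===== Notes on version B (the rewrite author's own statement) =====
-- stated objective: idiomatic
-- what changed: Replaced A's stateful index loop with greedy %%-skipping by a groupby pass that counts maximal runs of '%' with odd length.
import Mathlib
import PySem

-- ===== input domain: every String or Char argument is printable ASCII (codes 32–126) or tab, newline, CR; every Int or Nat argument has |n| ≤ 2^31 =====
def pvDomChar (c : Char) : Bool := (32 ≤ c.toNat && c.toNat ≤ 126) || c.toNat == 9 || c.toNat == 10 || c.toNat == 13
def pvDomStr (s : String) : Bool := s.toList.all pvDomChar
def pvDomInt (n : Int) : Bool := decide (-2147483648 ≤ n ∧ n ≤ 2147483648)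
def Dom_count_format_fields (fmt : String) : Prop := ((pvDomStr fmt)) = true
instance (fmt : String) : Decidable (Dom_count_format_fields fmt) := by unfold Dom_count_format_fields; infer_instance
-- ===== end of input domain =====

-- B counts maximal runs of consecutive '%' of odd length (groupby pass) instead of A's
-- index loop with greedy '%%' skipping; same cost, objective: idiomatic.

-- ===== PORT A =====
-- A's while loop over idx: each step skips one non-'%' char, skips a '%%' pair,
-- or counts a single '%'; ported as recursion over the remaining character list.
def count_format_fields_loop : List Char → Int → Int
  | [], count => count
  | c :: rest, count =>
    if c ≠ '%' then count_format_fields_loop rest count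
    else
      match rest with
      | d :: rest2 =>
        if d = '%' then count_format_fields_loop rest2 count
        else count_format_fields_loop (d :: rest2) (count + 1)
      | [] => count_format_fields_loop [] (count + 1)
termination_by cs _ => cs.length
decreasing_by all_goals (simp only [List.length_cons, List.length_nil]; omega)

def count_format_fields (fmt : String) : Int :=
  count_format_fields_loop fmt.toList 0

-- ===== PORT B =====
-- itertools.groupby ported as a run-length encoding of the character list.
def pvRuns : List Char → List (Char × Nat)
  | [] => []
  | c :: cs =>
    match pvRuns cs with
    | (d, n) :: t => if c = d then (c, n + 1) :: t else (c, 1) :: (d, n) :: t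
    | [] => [(c, 1)]

def count_format_fields_alt (fmt : String) : Int :=
  ((pvRuns fmt.toList).filter (fun g => g.1 == '%' && g.2 % 2 == 1)).length

-- ===== PRECONDITION & SPEC =====
def Spec_count_format_fields (fmt : String) (out : Int) : Prop := out = count_format_fields_alt fmt
instance (fmt : String) (out : Int) : Decidable (Spec_count_format_fields fmt out) := by unfold Spec_count_format_fields; infer_instance

-- ===== CLAIM (what is proved, stated in full; the proofs are below) =====
def Claim_equal_count_format_fields : Prop := ∀ (fmt : String), Dom_count_format_fields fmt → Spec_count_format_fields fmt (count_format_fields fmt)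

-- ===== LEMMAS AND PROOFS =====

def pvOddPct (l : List (Char × Nat)) : Nat :=
  (l.filter (fun g => g.1 == '%' && g.2 % 2 == 1)).length

theorem pvOddPct_cons (d : Char) (n : Nat) (t : List (Char × Nat)) :
    pvOddPct ((d, n) :: t) = (if d = '%' ∧ n % 2 = 1 then 1 else 0) + pvOddPct t := by
  by_cases h1 : d = '%' <;> by_cases h2 : n % 2 = 1 <;>
      simp [pvOddPct, h1, h2] <;> omega

theorem pvRuns_head_key (c : Char) (cs : List Char) :
    ∃ n t, pvRuns (c :: cs) = (c, n) :: t := by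
  simp only [pvRuns]
  cases h : pvRuns cs with
  | nil => exact ⟨1, [], rfl⟩
  | cons p t =>
    obtain ⟨d, n⟩ := p
    by_cases hc : c = d
    · subst hc; simp
    · simp [hc]

theorem pvOddPct_two_pct (cs : List Char) :
    pvOddPct (pvRuns ('%' :: '%' :: cs)) = pvOddPct (pvRuns cs) := by
  cases h : pvRuns cs with
  | nil =>
    have e : pvRuns ('%' :: '%' :: cs) = [('%', 1 + 1)] := by simp [pvRuns, h]
    rw [e, pvOddPct_cons]
    simp [pvOddPct]
  | cons p t =>
    obtain ⟨d, n⟩ := p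
    by_cases hd : d = '%'
    · subst hd
      have e : pvRuns ('%' :: '%' :: cs) = ('%', n + 1 + 1) :: t := by simp [pvRuns, h]
      rw [e, pvOddPct_cons, pvOddPct_cons]
      have hp : (n + 1 + 1) % 2 = n % 2 := by omega
      rw [hp]
    · have hd' : ('%' : Char) ≠ d := fun hh => hd hh.symm
      have e : pvRuns ('%' :: '%' :: cs) = ('%', 1 + 1) :: (d, n) :: t := by
        simp [pvRuns, h, hd']
      rw [e, pvOddPct_cons]
      simp

theorem pvOddPct_non_pct (c : Char) (cs : List Char) (hc : c ≠ '%') :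
    pvOddPct (pvRuns (c :: cs)) = pvOddPct (pvRuns cs) := by
  cases h : pvRuns cs with
  | nil =>
    have e : pvRuns (c :: cs) = [(c, 1)] := by simp [pvRuns, h]
    rw [e, pvOddPct_cons]
    simp [pvOddPct, hc]
  | cons p t =>
    obtain ⟨d, n⟩ := p
    by_cases hd : c = d
    · subst hd
      have e : pvRuns (c :: cs) = (c, n + 1) :: t := by simp [pvRuns, h]
      rw [e, pvOddPct_cons, pvOddPct_cons]
      simp [hc]
    · have e : pvRuns (c :: cs) = (c, 1) :: (d, n) :: t := by simp [pvRuns, h, hd]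
      rw [e, pvOddPct_cons]
      simp [hc]

theorem pvOddPct_single_pct (cs : List Char) (h : ∀ c cs', cs = c :: cs' → c ≠ '%') :
    pvOddPct (pvRuns ('%' :: cs)) = 1 + pvOddPct (pvRuns cs) := by
  cases cs with
  | nil =>
    have e : pvRuns ['%'] = [('%', 1)] := by simp [pvRuns]
    rw [e, pvOddPct_cons]
    simp [pvOddPct, pvRuns]
  | cons c cs' =>
    have hc : c ≠ '%' := h c cs' rfl
    have hne : ('%' : Char) ≠ c := Ne.symm hc
    obtain ⟨n, t, hr⟩ := pvRuns_head_key c cs'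
    have e : pvRuns ('%' :: c :: cs') = ('%', 1) :: (c, n) :: t := by
      rw [show pvRuns ('%' :: c :: cs') =
            (match pvRuns (c :: cs') with
             | (d, n) :: t => if '%' = d then ('%', n + 1) :: t
                              else ('%', 1) :: (d, n) :: t
             | [] => [('%', 1)]) from rfl, hr]
      simp [hne]
    rw [e, hr, pvOddPct_cons]
    simp

theorem count_format_fields_loop_eq (cs : List Char) (count : Int) :
    count_format_fields_loop cs count = count + (pvOddPct (pvRuns cs) : Int) := by
  have H : ∀ (k : Nat) (cs : List Char), cs.length ≤ k → ∀ count : Int,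
      count_format_fields_loop cs count = count + (pvOddPct (pvRuns cs) : Int) := by
    intro k
    induction k with
    | zero =>
      intro cs hlen count
      have hnil : cs = [] := List.eq_nil_of_length_eq_zero (Nat.le_zero.mp hlen)
      subst hnil
      simp [count_format_fields_loop, pvRuns, pvOddPct]
    | succ k ih =>
      intro cs hlen count
      cases cs with
      | nil => simp [count_format_fields_loop, pvRuns, pvOddPct]
      | cons c rest =>
        have hlen' : rest.length ≤ k := by
          simp only [List.length_cons] at hlen; omega
        by_cases hc : c = '%'
        · subst hc
          cases rest with
          | nil =>
            have e : count_format_fields_loop ['%'] count =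
                count_format_fields_loop [] (count + 1) := by
              simp [count_format_fields_loop]
            rw [e, ih [] (by simp) (count + 1),
              pvOddPct_single_pct [] (by intro a cs' hcc; cases hcc)]
            push_cast
            simp [pvRuns, pvOddPct]
          | cons d rest2 =>
            by_cases hd : d = '%'
            · subst hd
              have e : count_format_fields_loop ('%' :: '%' :: rest2) count =
                  count_format_fields_loop rest2 count := by
                simp [count_format_fields_loop]
              have hlen2 : rest2.length ≤ k := by
                simp only [List.length_cons] at hlen'; omega
              rw [e, ih rest2 hlen2 count, pvOddPct_two_pct]
            · have e : count_format_fields_loop ('%' :: d :: rest2) count =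
                  count_format_fields_loop (d :: rest2) (count + 1) := by
                simp [count_format_fields_loop, hd]
              rw [e, ih (d :: rest2) hlen' (count + 1),
                pvOddPct_single_pct (d :: rest2)
                  (by intro a cs' hcc hap
                      injection hcc with h1 _
                      exact hd (h1.symm ▸ hap))]
              push_cast
              ring
        · have e : count_format_fields_loop (c :: rest) count =
              count_format_fields_loop rest count := by
            rw [count_format_fields_loop.eq_def]
            simp [hc]
          rw [e, ih rest hlen' count, pvOddPct_non_pct c rest hc]
  exact H cs.length cs le_rfl count

-- ===== VERDICT (by name: the statement is the Claim_ definition above) =====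
theorem count_format_fields_spec : Claim_equal_count_format_fields := by
  intro fmt _
  unfold Spec_count_format_fields count_format_fields count_format_fields_alt
  rw [count_format_fields_loop_eq]
  unfold pvOddPct
  omega
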